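-- pv_equiv track=rewrite | github.com/khushbakhtahmed/Task2Model | dataset construction/Step1.py | build_unified_text
-- ===== SOURCE A (Python) =====
-- def build_unified_text(segments):
--     parts, spans, cur = [], [], 0
--     for label, txt in segments:
--         m = f"[[SECTION:{label}]]\n"
--         parts.append(m); cur += len(m)
--         s = cur
--         parts.append(txt); cur += len(txt)
--         spans.append((s, cur, label))
--         parts.append("\n\n"); cur += 2
--     unified = "".join(parts)
--     return unified, unified.lower(), spans
-- ===== SOURCE B (Python) =====
-- def build_unified_text(segments):
--     # Phase 1: build each segment's full block and join once.
--     markers = ["[[SECTION:%s]]\n" % label for label, _ in segments]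
--     blocks = [m + txt + "\n\n" for m, (_, txt) in zip(markers, segments)]
--     unified = "".join(blocks)
--     # Phase 2: prefix-sum table of block start offsets.
--     starts = [0]
--     for b in blocks:
--         starts.append(starts[-1] + len(b))
--     # Phase 3: derive each span from its block's start offset.
--     spans = [(st + len(m), st + len(m) + len(txt), label)
--              for st, m, (label, txt) in zip(starts, markers, segments)]
--     return unified, unified.lower(), spans
-- ===== Notes on version B (the rewrite author's own statement) =====
-- stated objective: alternative
-- what changed: Replaces A's single running loop (interleaving part-appends, offset bookkeeping and span emission) by three separate phases: build whole blocks and join once, compute a prefix-sum offset table over block lengths, then derive every span from that table.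
import Mathlib
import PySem

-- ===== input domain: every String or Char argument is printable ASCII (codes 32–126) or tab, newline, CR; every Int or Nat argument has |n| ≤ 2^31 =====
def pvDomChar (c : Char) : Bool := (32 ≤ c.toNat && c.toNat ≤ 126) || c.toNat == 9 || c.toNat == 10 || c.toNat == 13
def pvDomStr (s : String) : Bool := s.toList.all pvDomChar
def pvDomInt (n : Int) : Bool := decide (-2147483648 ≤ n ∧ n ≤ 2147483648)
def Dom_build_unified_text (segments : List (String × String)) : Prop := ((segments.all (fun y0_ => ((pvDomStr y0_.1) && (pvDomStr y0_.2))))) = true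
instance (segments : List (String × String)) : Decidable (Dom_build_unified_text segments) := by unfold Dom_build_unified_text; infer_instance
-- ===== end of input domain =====

-- B rebuilds the result in three separate phases (blocks + one join, a prefix-sum offset
-- table, spans derived from the table) instead of A's single running loop; proved equal.

-- ===== PORT A =====
def build_unified_text (segments : List (String × String)) : String × String × (List (Int × Int × String)) :=
  let st := segments.foldl
    (fun (st : List String × List (Int × Int × String) × Int) seg =>
      let parts := st.1
      let spans := st.2.1
      let cur := st.2.2
      let label := seg.1
      let txt := seg.2
      let m := "[[SECTION:" ++ label ++ "]]\n"
      let parts := parts ++ [m]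
      let cur := cur + PySem.Str.len m
      let s := cur
      let parts := parts ++ [txt]
      let cur := cur + PySem.Str.len txt
      let spans := spans ++ [(s, cur, label)]
      let parts := parts ++ ["\n\n"]
      let cur := cur + 2
      (parts, spans, cur)) ([], [], 0)
  let unified := PySem.Str.join "" st.1
  (unified, PySem.Str.lower unified, st.2.1)

-- ===== PORT B =====
def buMarker (label : String) : String := "[[SECTION:" ++ label ++ "]]\n"

def build_unified_text_alt (segments : List (String × String)) : String × String × (List (Int × Int × String)) :=
  let markers := segments.map (fun seg => buMarker seg.1)
  let blocks := (markers.zip segments).map (fun p => p.1 ++ p.2.2 ++ "\n\n")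
  let unified := PySem.Str.join "" blocks
  let starts := blocks.foldl
    (fun (acc : List Int) b => acc ++ [PySem.List.pyGetD acc (-1) 0 + PySem.Str.len b]) [0]
  let spans := ((starts.zip markers).zip segments).map (fun p =>
    (p.1.1 + PySem.Str.len p.1.2,
     p.1.1 + PySem.Str.len p.1.2 + PySem.Str.len p.2.2,
     p.2.1))
  (unified, PySem.Str.lower unified, spans)

-- ===== PRECONDITION & SPEC =====
def Spec_build_unified_text (segments : List (String × String)) (out : String × String × (List (Int × Int × String))) : Prop := out = build_unified_text_alt segments
instance (segments : List (String × String)) (out : String × String × (List (Int × Int × String))) : Decidable (Spec_build_unified_text segments out) := by unfold Spec_build_unified_text; infer_instance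

-- ===== CLAIM (what is proved, stated in full; the proofs are below) =====
def Claim_equal_build_unified_text : Prop := ∀ (segments : List (String × String)), Dom_build_unified_text segments → Spec_build_unified_text segments (build_unified_text segments)

-- ===== LEMMAS AND PROOFS =====

-- the three text pieces A appends for one segment
def buTrip (seg : String × String) : List String := [buMarker seg.1, seg.2, "\n\n"]

-- one whole block, as B builds it
def buBlock (seg : String × String) : String := buMarker seg.1 ++ seg.2 ++ "\n\n"

-- the spans A emits starting from offset c
def buSpans (c : Int) : List (String × String) → List (Int × Int × String)
  | [] => []
  | seg :: rest =>
      (c + PySem.Str.len (buMarker seg.1),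
       c + PySem.Str.len (buMarker seg.1) + PySem.Str.len seg.2,
       seg.1) :: buSpans (c + PySem.Str.len (buMarker seg.1) + PySem.Str.len seg.2 + 2) rest

-- the prefix-sum table B's second phase produces, starting at c
def buStarts (c : Int) : List String → List Int
  | [] => [c]
  | b :: bs => c :: buStarts (c + PySem.Str.len b) bs

lemma buBlock_len (seg : String × String) :
    PySem.Str.len (buBlock seg) =
      PySem.Str.len (buMarker seg.1) + PySem.Str.len seg.2 + 2 := by
  simp [buBlock]
  ring

-- A's loop, characterised
lemma foldA (segs : List (String × String)) (parts : List String)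
    (spans : List (Int × Int × String)) (cur : Int) :
    segs.foldl
      (fun (st : List String × List (Int × Int × String) × Int) seg =>
        let parts := st.1
        let spans := st.2.1
        let cur := st.2.2
        let label := seg.1
        let txt := seg.2
        let m := "[[SECTION:" ++ label ++ "]]\n"
        let parts := parts ++ [m]
        let cur := cur + PySem.Str.len m
        let s := cur
        let parts := parts ++ [txt]
        let cur := cur + PySem.Str.len txt
        let spans := spans ++ [(s, cur, label)]
        let parts := parts ++ ["\n\n"]
        let cur := cur + 2
        (parts, spans, cur))
      (parts, spans, cur)
    = (parts ++ segs.flatMap buTrip, spans ++ buSpans cur segs,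
       cur + ((segs.map (fun g => PySem.Str.len (buBlock g))).sum)) := by
  induction segs generalizing parts spans cur with
  | nil => simp [buSpans]
  | cons g rest ih =>
      simp only [List.foldl_cons]
      rw [ih]
      simp only [buSpans, buTrip, buMarker, buBlock_len, List.flatMap_cons, List.map_cons,
        List.sum_cons, Prod.mk.injEq]
      refine ⟨by simp, by simp, by ring⟩

-- B's prefix-sum loop, characterised
lemma foldStarts (bs : List String) (pre : List Int) (c : Int) :
    bs.foldl
      (fun (acc : List Int) b => acc ++ [PySem.List.pyGetD acc (-1) 0 + PySem.Str.len b])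
      (pre ++ [c])
    = pre ++ buStarts c bs := by
  induction bs generalizing pre c with
  | nil => simp [buStarts]
  | cons b rest ih =>
      have hlast : PySem.List.pyGetD (pre ++ [c]) (-1) 0 = c := by
        rw [PySem.List.pyGetD_neg_ofNat (pre ++ [c]) 1 0 (by omega) (by simp)]
        simp
      simp only [List.foldl_cons, hlast]
      rw [ih (pre ++ [c]) (c + PySem.Str.len b)]
      simp [buStarts]

-- joining with an empty separator is flattening
lemma join_nil_flatten (l : List (List Char)) : PySem.Chars.join [] l = l.flatten := by
  induction l with
  | nil => simp [PySem.Chars.join_nil]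
  | cons p rest ih =>
      cases rest with
      | nil => simp [PySem.Chars.join, List.intercalate]
      | cons q r =>
          rw [PySem.Chars.join_cons_cons]
          simp [ih]

lemma join_empty_toList (l : List String) :
    (PySem.Str.join "" l).toList = (l.map String.toList).flatten := by
  rw [PySem.Str.toList_join, show ("" : String).toList = [] from rfl]
  exact join_nil_flatten _

-- the two joins agree
lemma unified_eq (segs : List (String × String)) :
    PySem.Str.join "" (segs.flatMap buTrip) = PySem.Str.join "" (segs.map buBlock) := by
  apply String.toList_inj.mp
  rw [join_empty_toList, join_empty_toList]
  induction segs with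
  | nil => simp
  | cons g rest ih =>
      simp only [List.flatMap_cons, List.map_cons, List.map_append, List.flatten_cons,
        List.flatten_append, buTrip, buBlock]
      simp [String.toList_append, ih]

-- the spans B derives from the table agree with A's
lemma spans_eq (segs : List (String × String)) (c : Int) :
    (((buStarts c (segs.map buBlock)).zip (segs.map (fun seg => buMarker seg.1))).zip segs).map
      (fun p =>
        (p.1.1 + PySem.Str.len p.1.2,
         p.1.1 + PySem.Str.len p.1.2 + PySem.Str.len p.2.2,
         p.2.1))
    = buSpans c segs := by
  induction segs generalizing c with
  | nil => simp [buStarts, buSpans]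
  | cons g rest ih =>
      simp only [List.map_cons, buStarts, List.zip_cons_cons, buSpans, buBlock_len]
      rw [show c + (PySem.Str.len (buMarker g.1) + PySem.Str.len g.2 + 2)
            = c + PySem.Str.len (buMarker g.1) + PySem.Str.len g.2 + 2 by ring, ih]

-- ===== VERDICT (by name: the statement is the Claim_ definition above) =====
theorem build_unified_text_spec : Claim_equal_build_unified_text := by
  intro segs _
  unfold Spec_build_unified_text build_unified_text build_unified_text_alt
  dsimp only
  rw [foldA segs [] [] 0]
  have hz : (segs.map (fun seg => buMarker seg.1)).zip segs
      = segs.map (fun g => (buMarker g.1, g)) := by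
    have := List.zip_map' (f := fun (g : String × String) => buMarker g.1) (g := id) (l := segs)
    simpa using this
  have hblocks : ((segs.map (fun seg => buMarker seg.1)).zip segs).map
        (fun p => p.1 ++ p.2.2 ++ "\n\n") = segs.map buBlock := by
    rw [hz]; simp [buBlock, List.map_map, Function.comp]
  rw [hblocks]
  have hst := foldStarts (segs.map buBlock) [] 0
  simp only [List.nil_append] at hst ⊢
  rw [hst, spans_eq segs 0, unified_eq segs]
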